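-- pv_equiv track=rewrite | github.com/Bforartists/Bforartists | source/tools/check_source/check_licenses.py | next_line_non_empty
-- ===== SOURCE A (Python) =====
-- def next_line_non_empty(text: str, index: int) -> int:
--     while index < len(text):
--         index_prev = index
--         index = text.find("\n", index)
--         if index == -1:
--             index = index_prev
--             break
--         if text[index_prev:index].strip():
--             index = index_prev
--             break
--         # Step over the newline.
--         index = index + 1
--     return index
-- ===== SOURCE B (Python) =====
-- def next_line_non_empty(text: str, index: int) -> int:
--     # Single left-to-right character scan tracking the start of the current
--     # line and whether it contains a non-whitespace character, instead of
--     # repeated find()/slice()/strip() passes.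
--     start = index
--     seen = False
--     for i in range(max(index, 0), len(text)):
--         c = text[i]
--         if c == "\n":
--             if seen:
--                 return start
--             start = i + 1
--             seen = False
--         elif not c.isspace():
--             seen = True
--     return start
-- ===== Notes on version B (the rewrite author's own statement) =====
-- stated objective: alternative
-- what changed: Replaces the per-line find('\n')/slice/strip loop with a single character-by-character scan that keeps the current line start and a seen-non-whitespace flag.
-- outside the precondition, e.g. on next_line_non_empty('ab\ncd\n', -1): A returns 6, B returns -1
import Mathlib
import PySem

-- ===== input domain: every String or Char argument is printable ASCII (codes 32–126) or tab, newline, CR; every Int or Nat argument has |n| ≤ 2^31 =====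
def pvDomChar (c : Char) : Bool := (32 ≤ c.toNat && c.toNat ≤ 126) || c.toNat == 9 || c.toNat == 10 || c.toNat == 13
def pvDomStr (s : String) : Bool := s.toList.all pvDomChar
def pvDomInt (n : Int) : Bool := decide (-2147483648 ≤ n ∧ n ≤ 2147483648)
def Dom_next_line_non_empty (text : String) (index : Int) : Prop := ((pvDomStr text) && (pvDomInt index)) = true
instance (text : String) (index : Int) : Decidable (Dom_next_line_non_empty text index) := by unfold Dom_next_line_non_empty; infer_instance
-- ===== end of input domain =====

-- B replaces A's per-line find/slice/strip loop by a single character scan with a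
-- line-start and seen-non-whitespace state; same cost, different traversal.


-- ===== PORT A =====
-- Bounds on a successful findFrom, needed by the port's termination proof.
theorem pvFind_pos_lt (d : List Char) (h : PySem.Chars.find d ['\n'] ≠ -1) :
    0 ≤ PySem.Chars.find d ['\n'] ∧ PySem.Chars.find d ['\n'] < (d.length : Int) := by
  have hinf : ['\n'] <:+: d := (PySem.Chars.find_ne_neg_one_iff d ['\n']).mp h
  have h0 : 0 ≤ PySem.Chars.find d ['\n'] := (PySem.Chars.find_nonneg_iff d ['\n']).mpr hinf
  have hspec := PySem.Chars.findFrom_natCast_spec d ['\n'] 0 (by omega)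
  rw [show ((0 : Nat) : Int) = (0 : Int) from rfl, PySem.Chars.findFrom_zero] at hspec
  obtain ⟨-, hpre, -⟩ := hspec h
  have hlt : (PySem.Chars.find d ['\n']).toNat < d.length := by
    by_contra hge
    rw [List.drop_eq_nil_of_le (by omega)] at hpre
    exact (List.cons_ne_nil _ _) (List.prefix_nil.mp hpre)
  exact ⟨h0, by omega⟩

theorem pvFindFrom_bounds (s : List Char) (i : Int)
    (h : PySem.Chars.findFrom s ['\n'] i none ≠ -1) :
    0 ≤ PySem.Chars.findFrom s ['\n'] i none ∧
    PySem.Chars.findFrom s ['\n'] i none < (s.length : Int) ∧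
    (0 ≤ i → i ≤ PySem.Chars.findFrom s ['\n'] i none) := by
  unfold PySem.Chars.findFrom at h ⊢
  simp only at h ⊢
  set n : Int := (s.length : Int) with hn
  set st : Int := if i < 0 then if i + n < 0 then 0 else i + n else i with hst
  have hstnn : 0 ≤ st ∧ (0 ≤ i → st = i) := by
    rw [hst]; constructor
    · split_ifs <;> omega
    · intro hi; rw [if_neg (by omega : ¬ i < 0)]
  by_cases hns : n < st
  · rw [if_pos hns] at h; exact absurd rfl h
  · rw [if_neg hns] at h ⊢
    by_cases hr : PySem.Chars.find (List.drop st.toNat (List.take n.toNat s)) ['\n'] = -1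
    · rw [if_pos hr] at h; exact absurd rfl h
    · rw [if_neg hr] at h ⊢
      have hb := pvFind_pos_lt _ hr
      have hdlen : (List.drop st.toNat (List.take n.toNat s)).length = s.length - st.toNat := by
        simp [hn]
      rw [hdlen] at hb
      exact ⟨by omega, by omega, fun hi => by have := hstnn.2 hi; omega⟩

-- A's while-loop, transliterated: find the next '\n' from index; if none, return
-- index unchanged; if the line up to it strips non-empty, return its start; else
-- step past the newline and repeat.
def pvLoopA (s : List Char) (i : Int) : Int :=
  if (i < (s.length : Int)) then
    let j := PySem.Chars.findFrom s ['\n'] i none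
    if hj : j = -1 then i
    else if PySem.Chars.strip (PySem.Chars.slice s (some i) (some j)) ≠ [] then i
    else pvLoopA s (j + 1)
  else i
termination_by ((s.length : Int) - i).toNat
decreasing_by
  have := pvFindFrom_bounds s i hj
  omega

def next_line_non_empty (text : String) (index : Int) : Int :=
  pvLoopA text.toList index

-- ===== PORT B =====
-- B's for-loop over the characters from position max(index,0), carrying
-- (position, current line start, seen-non-whitespace flag).
def pvLoopB : List Char → Int → Int → Bool → Int
  | [], _, start, _ => start
  | c :: rest, i, start, seen =>
    if c = '\n' then
      if seen then start else pvLoopB rest (i + 1) (i + 1) false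
    else pvLoopB rest (i + 1) start (seen || !PySem.Chars.isspace c)

def next_line_non_empty_alt (text : String) (index : Int) : Int :=
  pvLoopB (text.toList.drop (max index 0).toNat) (max index 0) index false

-- ===== PRECONDITION & SPEC =====
-- Pre_ excludes negative index, outside the function's natural domain (index is a
-- position in text): there A's str.find/slice wrap the start around len(text),
-- giving accidental values B does not reproduce.
def Pre_next_line_non_empty (text : String) (index : Int) : Prop := 0 ≤ index
instance (text : String) (index : Int) : Decidable (Pre_next_line_non_empty text index) := by
  unfold Pre_next_line_non_empty; infer_instance

def pvWitness_next_line_non_empty : String × Int := ("a\n \nb", 0)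

def Spec_next_line_non_empty (text : String) (index : Int) (out : Int) : Prop := out = next_line_non_empty_alt text index
instance (text : String) (index : Int) (out : Int) : Decidable (Spec_next_line_non_empty text index out) := by unfold Spec_next_line_non_empty; infer_instance

-- ===== CLAIM (what is proved, stated in full; the proofs are below) =====
def Claim_equal_next_line_non_empty : Prop := ∀ (text : String) (index : Int), Dom_next_line_non_empty text index → Pre_next_line_non_empty text index → Spec_next_line_non_empty text index (next_line_non_empty text index)

-- ===== LEMMAS AND PROOFS =====

-- strip is empty exactly when every character is whitespace
theorem pvStrip_eq_nil_iff (l : List Char) :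
    PySem.Chars.strip l = [] ↔ ∀ c ∈ l, PySem.Chars.isspace c := by
  unfold PySem.Chars.strip PySem.Chars.rstrip PySem.Chars.lstrip
  constructor
  · intro h c hc
    rcases (List.takeWhile_append_dropWhile (p := PySem.Chars.isspace) (l := l)).symm ▸ hc with h'
    have hsplit := List.takeWhile_append_dropWhile (p := PySem.Chars.isspace) (l := l)
    by_cases hm : c ∈ l.takeWhile PySem.Chars.isspace
    · exact List.mem_takeWhile_imp hm
    · have hcd : c ∈ l.dropWhile PySem.Chars.isspace := by
        have := hsplit ▸ hc
        rcases List.mem_append.mp this with h1 | h2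
        · exact absurd h1 hm
        · exact h2
      have : (l.dropWhile PySem.Chars.isspace).reverse.dropWhile PySem.Chars.isspace = [] := by
        simpa using congrArg List.reverse h
      rw [List.dropWhile_eq_nil_iff] at this
      exact this c (by simpa using hcd)
  · intro h
    have h1 : l.dropWhile PySem.Chars.isspace = [] :=
      List.dropWhile_eq_nil_iff.mpr (fun c hc => h c hc)
    simp [h1]

-- B's scan over a newline-free tail just returns the carried start
theorem pvLoopB_no_newline (rest : List Char) (i start : Int) (seen : Bool)
    (h : '\n' ∉ rest) : pvLoopB rest i start seen = start := by
  induction rest generalizing i seen with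
  | nil => rfl
  | cons c t ih =>
    have hc : c ≠ '\n' := fun hh => h (hh ▸ List.mem_cons_self ..)
    simp only [pvLoopB, if_neg hc]
    exact ih _ _ (fun hm => h (List.mem_cons_of_mem _ hm))

-- B's scan across one full line (newline-free body plus its '\n')
theorem pvLoopB_line (line rest : List Char) (i start : Int) (seen : Bool)
    (h : '\n' ∉ line) :
    pvLoopB (line ++ '\n' :: rest) i start seen =
      if seen || line.any (fun c => !PySem.Chars.isspace c) then start
      else pvLoopB rest (i + (line.length : Int) + 1) (i + (line.length : Int) + 1) false := by
  induction line generalizing i seen with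
  | nil =>
    simp only [List.nil_append, pvLoopB, if_true, List.any_nil, Bool.or_false,
      List.length_nil, Int.natCast_zero, add_zero]
  | cons c t ih =>
    have hc : c ≠ '\n' := fun hh => h (hh ▸ List.mem_cons_self ..)
    simp only [List.cons_append, pvLoopB, if_neg hc]
    rw [ih _ _ (fun hm => h (List.mem_cons_of_mem _ hm))]
    have harith : i + 1 + (t.length : Int) + 1 = i + ((c :: t).length : Int) + 1 := by
      simp [List.length_cons]; omega
    rw [harith]
    congr 1
    simp [List.any_cons, Bool.or_assoc]

-- the singleton prefix at a valid position
theorem pvSingleton_prefix_drop (d : List Char) (p : Nat) (hp : p < d.length) :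
    [d[p]] <+: d.drop p := by
  rw [List.drop_eq_getElem_cons hp]
  exact ⟨d.drop (p + 1), rfl⟩

-- Main loop correspondence on a non-negative start index
theorem pvMain (s : List Char) (i : Int) (h0 : 0 ≤ i) :
    pvLoopA s i = pvLoopB (s.drop i.toNat) i i false := by
  generalize hfuel : s.length - i.toNat = n
  induction n using Nat.strong_induction_on generalizing i with
  | _ n ih =>
  by_cases hlt : i < (s.length : Int)
  · set k := i.toNat with hk
    have hik : i = (k : Int) := by omega
    have hkle : k ≤ s.length := by omega
    rw [pvLoopA, if_pos hlt]
    simp only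
    rw [hik, PySem.Chars.findFrom_natCast s ['\n'] k hkle]
    set d := s.drop k with hd
    set f := PySem.Chars.find d ['\n'] with hf
    by_cases hfneg : f = -1
    · -- no newline from k on: A returns i, B scans a newline-free tail
      rw [if_pos hfneg]
      have hnonl : '\n' ∉ d := by
        intro hm
        have : ['\n'] <:+: d := by
          rcases List.mem_iff_append.mp hm with ⟨l1, l2, heq⟩
          exact ⟨l1, l2, by rw [heq]; simp⟩
        exact (PySem.Chars.find_eq_neg_one_iff d ['\n']).mp hfneg this
      rw [pvLoopB_no_newline _ _ _ _ hnonl, dif_pos rfl]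
    · -- newline found at absolute position k + f
      rw [if_neg hfneg]
      have hspec := PySem.Chars.findFrom_natCast_spec d ['\n'] 0 (by omega)
      rw [show ((0 : Nat) : Int) = (0 : Int) from rfl, PySem.Chars.findFrom_zero, ← hf] at hspec
      obtain ⟨-, hpre, hmin⟩ := hspec hfneg
      have hf0 : 0 ≤ f := (PySem.Chars.find_nonneg_iff d ['\n']).mpr
        ((PySem.Chars.find_ne_neg_one_iff d ['\n']).mp hfneg)
      set m := f.toNat with hm
      have hfm : f = (m : Int) := by omega
      have hmlt : m < d.length := by
        by_contra hge
        rw [List.drop_eq_nil_of_le (by omega)] at hpre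
        exact (List.cons_ne_nil _ _) (List.prefix_nil.mp hpre)
      have hdm : d[m] = '\n' := by
        rcases hpre with ⟨t, ht⟩
        have := congrArg (fun l => l.head?) ht
        rw [List.drop_eq_getElem_cons hmlt] at ht
        exact (List.cons.injEq .. ▸ ht.symm).1
      set line := d.take m with hline
      have hsplit : d = line ++ '\n' :: d.drop (m + 1) := by
        rw [hline, ← hdm]
        rw [← List.drop_eq_getElem_cons hmlt, List.take_append_drop]
      have hnoline : '\n' ∉ line := by
        intro hmem
        rcases List.mem_take_iff_getElem.mp (hline ▸ hmem) with ⟨p, hp, hpeq⟩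
        have hplt : p < m := by omega
        have hpd : p < d.length := by omega
        exact hmin p (Nat.zero_le _) hplt (hpeq ▸ pvSingleton_prefix_drop d p hpd)
      -- the slice A strips is exactly `line`
      have hslice : PySem.Chars.slice s (some ((k : Int))) (some ((k : Int) + f)) = line := by
        rw [hfm, ← Int.natCast_add, PySem.Chars.slice_eq_listSlice,
          PySem.List.slice_natCast]
        simp [hline, hd]
      have hstrip := pvStrip_eq_nil_iff line
      have hjneg : ¬((k : Int) + f = -1) := by omega
      rw [dif_neg hjneg]
      by_cases hblank : ∀ c ∈ line, PySem.Chars.isspace c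
      · -- blank line: both step past the newline
        have hsl : PySem.Chars.strip (PySem.Chars.slice s (some ((k : Int))) (some ((k : Int) + f))) = [] := by
          rw [hslice]; exact hstrip.mpr hblank
        rw [if_neg (not_not.mpr hsl)]
        have hany : line.any (fun c => !PySem.Chars.isspace c) = false := by
          simp only [List.any_eq_false]
          intro c hc; simp [hblank c hc]
        conv_rhs => rw [hsplit]
        rw [pvLoopB_line _ _ _ _ _ hnoline, hany]
        simp only [Bool.or_false, Bool.false_eq_true, if_false]
        have hlen : line.length = m := by
          rw [hline]; exact List.length_take_of_le (by omega)
        have hnext : (k : Int) + f + 1 = (k : Int) + (line.length : Int) + 1 := by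
          rw [hlen, hfm]
        have hi' : ((k : Int) + f + 1).toNat = k + m + 1 := by omega
        have hrest : d.drop (m + 1) = s.drop (((k : Int) + f + 1).toNat) := by
          rw [hi', hd, List.drop_drop]; try congr 1; try omega
        rw [← hnext, hrest]
        exact ih (s.length - ((k : Int) + f + 1).toNat)
          (by omega) ((k : Int) + f + 1) (by omega) rfl
      · -- line has content: both return its start
        rw [if_pos (by
          intro hnil
          rw [hslice] at hnil
          exact hblank (hstrip.mp hnil))]
        conv_rhs => rw [hsplit]
        rw [pvLoopB_line _ _ _ _ _ hnoline]
        have hany : line.any (fun c => !PySem.Chars.isspace c) = true := by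
          simp only [List.any_eq_true]
          push Not at hblank
          rcases hblank with ⟨c, hc, hcs⟩
          exact ⟨c, hc, by simp [hcs]⟩
        rw [hany]
        simp
  · rw [pvLoopA, if_neg hlt]
    rw [List.drop_eq_nil_of_le (by omega)]
    rfl

-- ===== VERDICT (by name: the statement is the Claim_ definition above) =====
theorem next_line_non_empty_spec : Claim_equal_next_line_non_empty := by
  intro text index _hdom hpre
  unfold Spec_next_line_non_empty next_line_non_empty next_line_non_empty_alt
  have hmax : max index 0 = index := by
    unfold Pre_next_line_non_empty at hpre; omega
  rw [hmax]
  exact pvMain text.toList index (by unfold Pre_next_line_non_empty at hpre; exact hpre)
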